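-- pv_equiv track=rewrite | github.com/Thernn88/SAPPHYRE | phymmr/OutlierCheck.py | deinterleave
-- ===== SOURCE A (Python) =====
-- def deinterleave(fasta_lines: list) -> list:
--     result = []
--     this_out = []
--     for line in fasta_lines:
--         if line[0] == ">":
--             if this_out:
--                 result.append("".join(this_out))
--             result.append(line)
--             this_out = []
--         else:
--             this_out.append(line.strip())
--     if this_out:
--         result.append("".join(this_out))
--     return result
-- ===== SOURCE B (Python) =====
-- from itertools import groupby
--
--
-- def deinterleave(fasta_lines: list) -> list:
--     result = []
--     for is_header, group in groupby(fasta_lines, key=lambda line: line[0] == ">"):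
--         if is_header:
--             result.extend(group)
--         else:
--             result.append("".join(line.strip() for line in group))
--     return result
-- ===== Notes on version B (the rewrite author's own statement) =====
-- stated objective: idiomatic
-- what changed: Replaces the explicit accumulator/flush control flow with itertools.groupby run-grouping: headers are emitted as-is and each maximal run of sequence lines is joined in one step.
import Mathlib
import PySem

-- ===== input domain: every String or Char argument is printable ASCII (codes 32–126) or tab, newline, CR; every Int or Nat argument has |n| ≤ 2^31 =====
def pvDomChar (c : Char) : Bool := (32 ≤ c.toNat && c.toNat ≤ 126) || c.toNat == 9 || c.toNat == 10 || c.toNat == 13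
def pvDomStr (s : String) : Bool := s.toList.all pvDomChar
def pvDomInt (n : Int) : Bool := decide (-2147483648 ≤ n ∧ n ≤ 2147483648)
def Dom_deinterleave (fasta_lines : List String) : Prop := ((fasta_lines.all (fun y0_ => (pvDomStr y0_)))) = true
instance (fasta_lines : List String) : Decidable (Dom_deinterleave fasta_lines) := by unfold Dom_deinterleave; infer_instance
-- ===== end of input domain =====

-- B replaces A's accumulator/flush control flow by run-grouping (itertools.groupby): same
-- single pass, a different decomposition. Return values only; neither mutates its argument.

-- ===== PORT A =====
-- line[0] == ">": Python raises IndexError on "", excluded by Pre_; pyGet? returns none there.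
def pvIsHeader (line : String) : Bool := PySem.Str.pyGet? line 0 == some '>'

def deinterleave (fasta_lines : List String) : List String :=
  let st := fasta_lines.foldl (fun (st : List String × List String) line =>
    let result := st.1
    let this_out := st.2
    if pvIsHeader line then
      ((if this_out ≠ [] then result ++ [PySem.Str.join "" this_out] else result) ++ [line], [])
    else
      (result, this_out ++ [PySem.Str.strip line])) ([], [])
  if st.2 ≠ [] then st.1 ++ [PySem.Str.join "" st.2] else st.1

-- ===== PORT B =====
-- transliteration of Source B's groupby pass: each maximal run of equal key is handled at once.
def pvAltGo : List String → List String
  | [] => []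
  | line :: rest =>
    if pvIsHeader line then
      line :: pvAltGo rest
    else
      let run := rest.takeWhile (fun l => !pvIsHeader l)
      let rest' := rest.dropWhile (fun l => !pvIsHeader l)
      PySem.Str.join "" ((line :: run).map PySem.Str.strip) :: pvAltGo rest'
termination_by ls => ls.length
decreasing_by
  · simp
  · have := (List.dropWhile_sublist (l := rest) (p := fun l => !pvIsHeader l)).length_le
    simpa using Nat.lt_succ_of_le this

def deinterleave_alt (fasta_lines : List String) : List String := pvAltGo fasta_lines

-- ===== PRECONDITION & SPEC =====
-- Pre_ excludes lists containing an empty string: there Python A (and B) raise IndexError on line[0].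
def Pre_deinterleave (fasta_lines : List String) : Prop := ∀ line ∈ fasta_lines, line ≠ ""
instance (fasta_lines : List String) : Decidable (Pre_deinterleave fasta_lines) := by
  unfold Pre_deinterleave; infer_instance

def pvWitness_deinterleave : List String := [">h1", "ACGT ", "TT", ">h2", "GG"]

def Spec_deinterleave (fasta_lines : List String) (out : List String) : Prop := out = deinterleave_alt fasta_lines
instance (fasta_lines : List String) (out : List String) : Decidable (Spec_deinterleave fasta_lines out) := by unfold Spec_deinterleave; infer_instance

-- ===== CLAIM (what is proved, stated in full; the proofs are below) =====
def Claim_equal_deinterleave : Prop := ∀ (fasta_lines : List String), Dom_deinterleave fasta_lines → Pre_deinterleave fasta_lines → Spec_deinterleave fasta_lines (deinterleave fasta_lines)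

-- ===== LEMMAS AND PROOFS =====

-- A's loop-plus-final-flush, written as a recursion on the remaining lines with the pending run.
def pvSpine (pending : List String) : List String → List String
  | [] => if pending ≠ [] then [PySem.Str.join "" pending] else []
  | line :: rest =>
    if pvIsHeader line then
      (if pending ≠ [] then [PySem.Str.join "" pending] else []) ++ line :: pvSpine [] rest
    else
      pvSpine (pending ++ [PySem.Str.strip line]) rest

theorem pvFoldl_eq_spine (ls : List String) (result pending : List String) :
    (let st := ls.foldl (fun (st : List String × List String) line =>
      let r := st.1
      let t := st.2
      if pvIsHeader line then
        ((if t ≠ [] then r ++ [PySem.Str.join "" t] else r) ++ [line], [])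
      else
        (r, t ++ [PySem.Str.strip line])) (result, pending)
    if st.2 ≠ [] then st.1 ++ [PySem.Str.join "" st.2] else st.1)
    = result ++ pvSpine pending ls := by
  induction ls generalizing result pending with
  | nil =>
    simp only [List.foldl_nil, pvSpine]
    split_ifs <;> simp
  | cons line rest ih =>
    simp only [List.foldl_cons, pvSpine]
    by_cases h : pvIsHeader line
    · simp only [h, if_pos]
      rw [ih]
      split_ifs <;> simp
    · simp only [h, Bool.false_eq_true, if_false]
      rw [ih]

theorem pvSpine_run (run : List String) (pending : List String) (rest : List String)
    (h : ∀ l ∈ run, pvIsHeader l = false) :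
    pvSpine pending (run ++ rest) = pvSpine (pending ++ run.map PySem.Str.strip) rest := by
  induction run generalizing pending with
  | nil => simp
  | cons a t ih =>
    have ha : pvIsHeader a = false := h a (by simp)
    simp only [List.cons_append, pvSpine, ha, Bool.false_eq_true, if_false, List.map_cons]
    rw [ih _ (fun l hl => h l (by simp [hl]))]
    simp

theorem pvSpine_eq_altGo (ls : List String) : pvSpine [] ls = pvAltGo ls := by
  induction ls using pvAltGo.induct with
  | case1 => simp [pvSpine, pvAltGo]
  | case2 line rest h ih =>
    simp only [pvSpine, h, if_true, pvAltGo]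
    simpa using ih
  | case3 line rest h rest' ih =>
    have hh : pvIsHeader line = false := by simpa using h
    have hsplit : line :: rest =
        (line :: rest.takeWhile (fun l => !pvIsHeader l)) ++ rest.dropWhile (fun l => !pvIsHeader l) := by
      simp
    have hrun : ∀ l ∈ line :: rest.takeWhile (fun l => !pvIsHeader l), pvIsHeader l = false := by
      intro l hl
      rcases List.mem_cons.mp hl with rfl | hl
      · exact hh
      · simpa using List.mem_takeWhile_imp hl
    have hrest' : ∀ pend : List String, pend ≠ [] →
        pvSpine pend (rest.dropWhile (fun l => !pvIsHeader l)) =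
          PySem.Str.join "" pend :: pvSpine [] (rest.dropWhile (fun l => !pvIsHeader l)) := by
      intro pend hpend
      cases hd : rest.dropWhile (fun l => !pvIsHeader l) with
      | nil => simp [pvSpine, hpend]
      | cons b bs =>
        have hb : pvIsHeader b = true := by
          have := List.head?_dropWhile_not (p := fun l => !pvIsHeader l) (l := rest)
          rw [hd] at this
          simpa using this
        simp [pvSpine, hb, hpend]
    calc pvSpine [] (line :: rest)
        = pvSpine ([] ++ (line :: rest.takeWhile (fun l => !pvIsHeader l)).map PySem.Str.strip)
            (rest.dropWhile (fun l => !pvIsHeader l)) := by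
          conv_lhs => rw [hsplit]
          exact pvSpine_run _ _ _ hrun
      _ = PySem.Str.join "" ((line :: rest.takeWhile (fun l => !pvIsHeader l)).map PySem.Str.strip) ::
            pvSpine [] (rest.dropWhile (fun l => !pvIsHeader l)) := by
          rw [List.nil_append]
          exact hrest' _ (by simp)
      _ = pvAltGo (line :: rest) := by
          conv_rhs => rw [pvAltGo]
          rw [if_neg h, ih]

-- ===== VERDICT (by name: the statement is the Claim_ definition above) =====
theorem deinterleave_spec : Claim_equal_deinterleave := by
  intro fasta_lines _ _
  show deinterleave fasta_lines = deinterleave_alt fasta_lines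
  unfold deinterleave deinterleave_alt
  rw [pvFoldl_eq_spine fasta_lines [] []]
  simpa using pvSpine_eq_altGo fasta_lines
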